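-- pv_equiv track=rewrite | github.com/VincentHaller/quick_sim | Py_Code/location_helpers.py | py_loc_vector
-- ===== SOURCE A (Python) =====
-- def py_loc_vector(dimensions:list, location:list):
--     """
--         Takes matrix location turns it into vector location
--
--             Parameters:
--                 dimenstions: list of integers.
--                 location: list of integers
--
--             Returns:
--                 vector_loc: integer, matrix location in vector form.
--     """
--     len_dim = len(dimensions)
--     vector_loc = 0
--     mult_value = 1
--
--     for i in range(len_dim):
--         vector_loc += mult_value * location[(len_dim-1) - i]
--         mult_value *= dimensions[(len_dim-1) - i]
--
--     return vector_loc
-- ===== SOURCE B (Python) =====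
-- def py_loc_vector(dimensions: list, location: list):
--     # Two-pass: build the stride table (suffix products of dimensions),
--     # then take the dot product with the location coordinates.
--     strides = []
--     s = 1
--     for d in reversed(dimensions):
--         strides.append(s)
--         s *= d
--     strides.reverse()
--     return sum(st * loc for st, loc in zip(strides, location))
-- ===== Notes on version B (the rewrite author's own statement) =====
-- stated objective: alternative
-- what changed: Replaces A's single interleaved loop (accumulating result and running multiplier together, back-to-front) with two separate passes: one building the stride table as suffix products of dimensions, then a dot product of strides with location.
import Mathlib
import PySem

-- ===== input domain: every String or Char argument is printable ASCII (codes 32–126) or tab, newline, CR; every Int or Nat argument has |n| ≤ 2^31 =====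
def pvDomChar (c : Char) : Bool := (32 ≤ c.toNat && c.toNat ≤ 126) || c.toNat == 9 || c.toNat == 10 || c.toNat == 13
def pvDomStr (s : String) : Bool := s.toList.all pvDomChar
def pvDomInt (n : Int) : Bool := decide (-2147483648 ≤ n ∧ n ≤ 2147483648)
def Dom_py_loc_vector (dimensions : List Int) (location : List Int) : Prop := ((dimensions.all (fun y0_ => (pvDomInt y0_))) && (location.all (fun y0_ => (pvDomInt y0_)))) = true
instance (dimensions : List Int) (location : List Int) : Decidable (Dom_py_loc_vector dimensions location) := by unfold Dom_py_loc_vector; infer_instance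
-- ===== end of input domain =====

-- B replaces A's single interleaved accumulate-result-and-multiplier loop by a stride-table
-- pass (suffix products) followed by a separate dot-product pass; same cost, different decomposition.

-- ===== PORT A =====
def py_loc_vector (dimensions : List Int) (location : List Int) : Int :=
  let lenDim : Int := dimensions.length
  ((PySem.List.pyRange 0 lenDim 1).foldl
    (fun (st : Int × Int) i =>
      (st.1 + st.2 * PySem.List.pyGetD location ((lenDim - 1) - i) 0,
       st.2 * PySem.List.pyGetD dimensions ((lenDim - 1) - i) 0))
    (0, 1)).1

-- ===== PORT B =====
def py_loc_vector_alt (dimensions : List Int) (location : List Int) : Int :=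
  let p := dimensions.reverse.foldl
    (fun (st : List Int × Int) d => (st.1 ++ [st.2], st.2 * d)) ([], 1)
  let strides := p.1.reverse
  (strides.zip location).foldl (fun acc q => acc + q.1 * q.2) 0

-- ===== PRECONDITION & SPEC =====
-- A indexes location[(len_dim-1)-i]; it raises IndexError exactly when location is shorter than dimensions.
def Pre_py_loc_vector (dimensions : List Int) (location : List Int) : Prop :=
  dimensions.length ≤ location.length
instance (dimensions : List Int) (location : List Int) : Decidable (Pre_py_loc_vector dimensions location) := by unfold Pre_py_loc_vector; infer_instance
def pvWitness_py_loc_vector : List Int × List Int := ([2, 3, 4], [1, 2, 3])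

def Spec_py_loc_vector (dimensions : List Int) (location : List Int) (out : Int) : Prop := out = py_loc_vector_alt dimensions location
instance (dimensions : List Int) (location : List Int) (out : Int) : Decidable (Spec_py_loc_vector dimensions location out) := by unfold Spec_py_loc_vector; infer_instance

-- ===== CLAIM (what is proved, stated in full; the proofs are below) =====
def Claim_equal_py_loc_vector : Prop := ∀ (dimensions : List Int) (location : List Int), Dom_py_loc_vector dimensions location → Pre_py_loc_vector dimensions location → Spec_py_loc_vector dimensions location (py_loc_vector dimensions location)
-- ===== LEMMAS AND PROOFS =====

-- step function of A's loop, seen as consuming a (dimension, coordinate) pair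
def pvStep (st : Int × Int) (q : Int × Int) : Int × Int := (st.1 + st.2 * q.2, st.2 * q.1)

-- the stride list B's first pass builds (over the reversed dimensions, before the final reverse)
def pvG : List Int → Int → List Int
  | [], _ => []
  | r :: rs, s => s :: pvG rs (s * r)

lemma pvG_concat (xs : List Int) (d : Int) : ∀ s, pvG (xs ++ [d]) s = pvG xs s ++ [s * xs.prod] := by
  induction xs with
  | nil => intro s; simp [pvG]
  | cons x xs ih => intro s; simp [pvG, ih (s * x), mul_assoc]

lemma pvB_fold (rs : List Int) : ∀ (acc : List Int) (s : Int),
    rs.foldl (fun (st : List Int × Int) d => (st.1 ++ [st.2], st.2 * d)) (acc, s)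
      = (acc ++ pvG rs s, s * rs.prod) := by
  induction rs with
  | nil => intro acc s; simp [pvG]
  | cons r rs ih => intro acc s; simp [pvG, ih (acc ++ [s]) (s * r), mul_assoc]

lemma pv_fold_range_eq {S : Type} (f : S → Int × Int → S) :
    ∀ (zs : List (Int × Int)) (G : Int → Int × Int) (init : S),
      (∀ (k : Nat) (hk : k < zs.length), G (k : Int) = zs[k]) →
      (PySem.List.pyRange 0 (zs.length : Int) 1).foldl (fun st i => f st (G i)) init
        = zs.foldl f init := by
  intro zs
  induction zs using List.reverseRecOn with
  | nil => intro G init _; simp [PySem.List.pyRange_one_eq_nil]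
  | append_singleton ys y ih =>
    intro G init hG
    have hlen : ((ys ++ [y]).length : Int) = (ys.length : Int) + 1 := by simp
    rw [hlen, PySem.List.pyRange_one_succ_right (by positivity), List.foldl_append]
    have hy : G (ys.length : Int) = y := by
      have := hG ys.length (by simp)
      simpa using this
    rw [List.foldl_append]
    simp only [List.foldl_cons, List.foldl_nil, hy]
    congr 1
    apply ih
    intro k hk
    have := hG k (by simp; omega)
    rwa [List.getElem_append_left hk] at this

lemma pvAlt_nil (ls : List Int) : py_loc_vector_alt [] ls = 0 := by
  simp [py_loc_vector_alt]

lemma pvAlt_cons (d : Int) (ds : List Int) (l : Int) (ls : List Int) :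
    py_loc_vector_alt (d :: ds) (l :: ls) = ds.prod * l + py_loc_vector_alt ds ls := by
  unfold py_loc_vector_alt
  simp only []
  rw [show (d :: ds).reverse = ds.reverse ++ [d] by simp,
      pvB_fold, pvB_fold, pvG_concat]
  simp only [List.nil_append, List.reverse_append, List.reverse_singleton, List.singleton_append,
    List.prod_reverse, one_mul, List.zip_cons_cons, List.foldl_cons]
  rw [PySem.List.foldl_add, PySem.List.foldl_add]
  ring

lemma pvMain : ∀ (ds ls : List Int), ds.length ≤ ls.length →
    ((ds.zip ls).reverse.foldl pvStep (0, 1)) = (py_loc_vector_alt ds ls, ds.prod) := by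
  intro ds
  induction ds with
  | nil => intro ls _; simp [pvAlt_nil]
  | cons d ds ih =>
    intro ls hlen
    cases ls with
    | nil => simp at hlen
    | cons l ls =>
      have h' : ds.length ≤ ls.length := by simpa using hlen
      rw [List.zip_cons_cons, List.reverse_cons, List.foldl_append, ih ls h']
      simp [pvStep, pvAlt_cons, List.prod_cons]
      constructor
      · ring
      · ring

-- ===== VERDICT (by name: the statement is the Claim_ definition above) =====
theorem py_loc_vector_spec : Claim_equal_py_loc_vector := by
  intro ds ls _ hpre
  have hp : ds.length ≤ ls.length := hpre
  unfold Spec_py_loc_vector py_loc_vector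
  have hzn : (ds.zip ls).reverse.length = ds.length := by
    simp [List.length_zip]; omega
  have hzlen : (((ds.zip ls).reverse.length : Int)) = ((ds.length : Int)) := by
    omega
  rw [← hzlen]
  have hstep :
      (PySem.List.pyRange 0 (((ds.zip ls).reverse.length : Int)) 1).foldl
        (fun (st : Int × Int) i =>
          (st.1 + st.2 * PySem.List.pyGetD ls ((((ds.zip ls).reverse.length : Int)) - 1 - i) 0,
           st.2 * PySem.List.pyGetD ds ((((ds.zip ls).reverse.length : Int)) - 1 - i) 0)) (0, 1)
        = (ds.zip ls).reverse.foldl pvStep (0, 1) := by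
    refine pv_fold_range_eq pvStep
      ((ds.zip ls).reverse)
      (fun i => (PySem.List.pyGetD ds ((((ds.zip ls).reverse.length : Int)) - 1 - i) 0,
                 PySem.List.pyGetD ls ((((ds.zip ls).reverse.length : Int)) - 1 - i) 0))
      (0, 1) ?_
    intro k hk
    have hkd : k < ds.length := hzn ▸ hk
    have hidx : ((((ds.zip ls).reverse.length : Int)) - 1 - (k : Int)).toNat = ds.length - 1 - k := by
      omega
    have h0 : (0:Int) ≤ (((ds.zip ls).reverse.length : Int)) - 1 - (k : Int) := by omega
    rw [List.getElem_reverse, List.getElem_zip]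
    refine Prod.ext ?_ ?_ <;> simp only []
    · rw [PySem.List.pyGetD_eq_getElem _ _ h0 (by omega)]
      exact getElem_congr rfl (by simp [List.length_zip]; omega) (by omega)
    · rw [PySem.List.pyGetD_eq_getElem _ _ h0 (by omega)]
      exact getElem_congr rfl (by simp [List.length_zip]; omega) (by omega)
  simp only [hstep, pvMain ds ls hp]
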